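-- pv_equiv track=rewrite | github.com/rschaeff/dpam_c2 | dpam/steps/step13_parse_domains.py | initial_segmentation
-- ===== SOURCE A (Python) =====
-- from typing import Set, Dict, List, Tuple
--
-- def initial_segmentation(length: int, diso_resids: Set[int]) -> List[List[int]]:
--     """
--     Create initial 5-residue segments excluding disorder.
--
--     Keep segments with >= 3 residues (v1.0 lines 446-456).
--     """
--     segments = []
--
--     for start in range(1, length + 1, 5):
--         segment = []
--         for res in range(start, min(start + 5, length + 1)):
--             if res not in diso_resids:
--                 segment.append(res)
--
--         if len(segment) >= 3:
--             segments.append(segment)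
--
--     return segments
-- ===== SOURCE B (Python) =====
-- def initial_segmentation(length, diso_resids):
--     """Group the ordered residues into buckets keyed by (res-1)//5 in one flat
--     pass, then keep the buckets holding >= 3 residues (dict insertion order)."""
--     buckets = {}
--     for res in range(1, length + 1):
--         if res not in diso_resids:
--             buckets.setdefault((res - 1) // 5, []).append(res)
--     return [seg for seg in buckets.values() if len(seg) >= 3]
-- ===== Notes on version B (the rewrite author's own statement) =====
-- stated objective: alternative
-- what changed: Replaces A's nested block/inner-range loops and per-block conditional append by a single flat residue scan that groups kept residues into an insertion-ordered dict of buckets keyed by (res-1)//5, followed by a filter over the dict's values keeping buckets of size >= 3.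
import Mathlib
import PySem

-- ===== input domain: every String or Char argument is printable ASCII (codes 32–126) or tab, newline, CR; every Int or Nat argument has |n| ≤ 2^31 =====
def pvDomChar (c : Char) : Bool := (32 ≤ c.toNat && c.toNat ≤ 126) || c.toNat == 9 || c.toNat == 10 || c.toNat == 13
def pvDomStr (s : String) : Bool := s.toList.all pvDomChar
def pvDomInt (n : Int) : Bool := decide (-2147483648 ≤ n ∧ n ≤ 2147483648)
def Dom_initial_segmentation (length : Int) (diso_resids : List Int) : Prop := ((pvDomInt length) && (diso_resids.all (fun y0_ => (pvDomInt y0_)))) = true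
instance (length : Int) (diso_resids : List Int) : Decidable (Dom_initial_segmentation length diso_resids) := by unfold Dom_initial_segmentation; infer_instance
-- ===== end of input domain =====

-- B replaces A's nested block/inner-range loops by a single flat pass grouping the kept
-- residues into an insertion-ordered dict of buckets keyed by (res-1)//5, then keeping
-- the buckets of size >= 3 (objective: alternative, same O(length) cost).

-- ===== PORT A =====
-- inner loop of A: build the segment for one block (literal transliteration)
def a_segment (length : Int) (diso_resids : List Int) (start : Int) : List Int :=
  (PySem.List.pyRange start (min (start + 5) (length + 1)) 1).foldl
    (fun segment res => if ¬(res ∈ diso_resids) then segment ++ [res] else segment) []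

-- body of A's outer loop for one `start`
def a_step (length : Int) (diso_resids : List Int) (segments : List (List Int)) (start : Int) : List (List Int) :=
  let segment := a_segment length diso_resids start
  if 3 ≤ segment.length then segments ++ [segment] else segments

def initial_segmentation (length : Int) (diso_resids : List Int) : List (List Int) :=
  (PySem.List.pyRange 1 (length + 1) 5).foldl (a_step length diso_resids) []

-- ===== PORT B =====
-- Source B's bucket key (res - 1) // 5
def b_key (res : Int) : Int := PySem.Int.floordiv (res - 1) 5

-- body of B's single loop: `buckets.setdefault((res-1)//5, []).append(res)` sets
-- buckets[k] = buckets.get(k, []) + [res], i.e. Dict.modify k [] (· ++ [res])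
def b_step (diso_resids : List Int) (d : PySem.Dict Int (List Int)) (res : Int) : PySem.Dict Int (List Int) :=
  if ¬(res ∈ diso_resids) then d.modify (b_key res) [] (fun seg => seg ++ [res]) else d

def initial_segmentation_alt (length : Int) (diso_resids : List Int) : List (List Int) :=
  let buckets := (PySem.List.pyRange 1 (length + 1) 1).foldl (b_step diso_resids) PySem.Dict.empty
  buckets.values.filter (fun seg => decide (3 ≤ seg.length))

-- ===== PRECONDITION & SPEC =====
def Spec_initial_segmentation (length : Int) (diso_resids : List Int) (out : List (List Int)) : Prop := out = initial_segmentation_alt length diso_resids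
instance (length : Int) (diso_resids : List Int) (out : List (List Int)) : Decidable (Spec_initial_segmentation length diso_resids out) := by unfold Spec_initial_segmentation; infer_instance

-- ===== CLAIM (what is proved, stated in full; the proofs are below) =====
def Claim_equal_initial_segmentation : Prop := ∀ (length : Int) (diso_resids : List Int), Dom_initial_segmentation length diso_resids → Spec_initial_segmentation length diso_resids (initial_segmentation length diso_resids)

-- ===== LEMMAS AND PROOFS =====

-- range(a, b, 5) is empty when b ≤ a
lemma pyRange5_eq_nil (a b : Int) (h : b ≤ a) : PySem.List.pyRange a b 5 = [] := by
  rw [PySem.List.pyRange_of_pos a b (by norm_num)]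
  rw [if_neg (by omega)]
  simp

-- range(a, b, 5) peels its first element when a < b
lemma pyRange5_cons (a b : Int) (h : a < b) :
    PySem.List.pyRange a b 5 = a :: PySem.List.pyRange (a + 5) b 5 := by
  rw [PySem.List.pyRange_of_pos a b (by norm_num), PySem.List.pyRange_of_pos (a+5) b (by norm_num)]
  rw [if_pos h]
  have hm : ((b - a + 5 - 1) / 5).toNat
      = (if a + 5 < b then ((b - (a + 5) + 5 - 1) / 5).toNat else 0) + 1 := by
    split <;> omega
  rw [hm, List.range_succ_eq_map, List.map_cons, List.map_map]
  refine congrArg₂ _ (by simp) ?_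
  apply List.map_congr_left
  intro k _
  simp [Function.comp]
  ring

-- every residue of the block starting at s (s ≡ 1 mod 5) has bucket key b_key s
lemma b_key_block (s r : Int) (h5 : s % 5 = 1) (h1 : s ≤ r) (h2 : r < s + 5) :
    b_key r = b_key s := by
  unfold b_key
  have hs := (PySem.Int.floordiv_eq_iff_of_pos (a := s - 1) (b := 5)
    (q := PySem.Int.floordiv (s - 1) 5) (by norm_num)).1 rfl
  exact (PySem.Int.floordiv_eq_iff_of_pos (by norm_num)).2 (by omega)

-- the next block's key is one bigger
lemma b_key_succ (s : Int) (h5 : s % 5 = 1) : b_key (s + 5) = b_key s + 1 := by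
  unfold b_key
  have hs := (PySem.Int.floordiv_eq_iff_of_pos (a := s - 1) (b := 5)
    (q := PySem.Int.floordiv (s - 1) 5) (by norm_num)).1 rfl
  exact (PySem.Int.floordiv_eq_iff_of_pos (by norm_num)).2 (by omega)

-- Set.update by a list of elements already in the set is the identity
lemma set_update_all_mem (b : Int) (m : List Int) (S : PySem.Set Int)
    (hm : ∀ x ∈ m, x = b) (hb : b ∈ S) : PySem.Set.update S m = S := by
  induction m with
  | nil => rfl
  | cons x xs ih =>
    rw [PySem.Set.update_cons, hm x (List.mem_cons_self ..), PySem.Set.add_of_mem hb]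
    exact ih (fun y hy => hm y (List.mem_cons_of_mem _ hy))

-- Set.update by a nonempty constant-b list on a set not containing b appends b once
lemma set_update_const (b : Int) (m : List Int) (S : PySem.Set Int)
    (hm : ∀ x ∈ m, x = b) (hb : b ∉ S) (hne : m ≠ []) :
    PySem.Set.update S m = S ++ [b] := by
  cases m with
  | nil => exact absurd rfl hne
  | cons x xs =>
    rw [PySem.Set.update_cons, hm x (List.mem_cons_self ..), PySem.Set.add_of_not_mem hb]
    exact set_update_all_mem b xs (S ++ [b])
      (fun y hy => hm y (List.mem_cons_of_mem _ hy))
      (List.mem_append.2 (Or.inr (List.mem_singleton_self b)))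

-- B's loop over one 5-block: the dict gains exactly A's segment (as one bucket) when it
-- is nonempty, and is untouched otherwise
lemma blockB (length : Int) (diso_resids : List Int) (s : Int) (d : PySem.Dict Int (List Int))
    (h5 : s % 5 = 1) (_h1 : 1 ≤ s) (h2 : s ≤ length) (hnd : d.keys.Nodup)
    (hlt : ∀ k ∈ d.keys, k < b_key s) :
    let e := min (s + 5) (length + 1)
    let seg := (PySem.List.pyRange s e 1).filter (fun r => decide (¬(r ∈ diso_resids)))
    let d' := (PySem.List.pyRange s e 1).foldl (b_step diso_resids) d
    d'.keys.Nodup ∧ (∀ k ∈ d'.keys, k ≤ b_key s) ∧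
      d'.values = d.values ++ (if seg = [] then [] else [seg]) := by
  intro e seg d'
  have hbd : (b_key s) ∉ d.keys := fun h => absurd (hlt _ h) (by omega)
  have hkeyseg : ∀ r ∈ seg, b_key r = b_key s := by
    intro r hr
    have hr' : r ∈ PySem.List.pyRange s e 1 := List.mem_of_mem_filter hr
    rw [PySem.List.mem_pyRange_one] at hr'
    exact b_key_block s r h5 hr'.1 (by omega)
  -- rewrite the block fold as a modify-fold over the kept residues
  have hd' : d' = seg.foldl (fun d r => d.modify (b_key r) [] (fun v => v ++ [r])) d := by
    show (PySem.List.pyRange s e 1).foldl (b_step diso_resids) d = _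
    exact PySem.List.foldl_ite_eq_foldl_filter (fun r => ¬(r ∈ diso_resids))
      (fun d r => d.modify (b_key r) [] (fun v => v ++ [r])) _ d
  have hkeys : d'.keys = PySem.Set.update d.keys (seg.map b_key) := by
    rw [hd']
    exact PySem.Dict.keys_foldl_modify_key seg b_key [] (fun _ r v => v ++ [r]) d
  have hmapconst : ∀ x ∈ seg.map b_key, x = b_key s := by
    intro x hx
    obtain ⟨r, hr, hrx⟩ := List.mem_map.1 hx
    rw [← hrx]; exact hkeyseg r hr
  -- the getD characterisation via the pair form of the fold
  have hpairs : d' = (seg.map (fun r => (b_key r, r))).foldl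
      (fun d p => d.modify p.1 [] (fun v => v ++ [p.2])) d := by
    rw [hd', List.foldl_map]
  by_cases hseg : seg = []
  · -- empty bucket: the fold does nothing
    have : d' = d := by rw [hd', hseg]; rfl
    refine ⟨this ▸ hnd, ?_, by rw [this, if_pos hseg, List.append_nil]⟩
    intro k hk
    rw [this] at hk
    exact le_of_lt (hlt k hk)
  · -- nonempty bucket: one new key b_key s at the end, value = seg
    have hkeys' : d'.keys = d.keys ++ [b_key s] := by
      rw [hkeys, set_update_const (b_key s) _ _ hmapconst hbd (by simpa using hseg)]
    have hnd' : d'.keys.Nodup := by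
      rw [hkeys']
      refine List.Nodup.append hnd (List.nodup_singleton _) ?_
      intro a ha hb
      rw [List.mem_singleton] at hb
      subst hb
      exact absurd (hlt _ ha) (lt_irrefl _)
    have hcontains : d.contains (b_key s) = false := by
      rcases Bool.eq_false_or_eq_true (d.contains (b_key s)) with h | h
      · exact absurd ((PySem.Dict.contains_iff_mem_keys d _).1 h) hbd
      · exact h
    have hgd : ∀ c, d'.getD c [] = d.getD c [] ++ (seg.filter (fun r => b_key r == c)) := by
      intro c
      rw [hpairs, PySem.Dict.getD_foldl_modify_append]
      congr 1
      induction seg with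
      | nil => rfl
      | cons x xs ih =>
        simp only [List.map_cons, List.filter_cons]
        by_cases hx : b_key x == c
        · simp only [hx, if_pos, List.map_cons, ih]
        · rw [if_neg (by simpa using hx), if_neg (by simpa using hx)]
          exact ih
    have hgdb : d'.getD (b_key s) [] = seg := by
      rw [hgd, PySem.Dict.getD_of_not_contains d [] hcontains, List.nil_append]
      exact List.filter_eq_self.2 (fun r hr => by simp [hkeyseg r hr])
    have hgdne : ∀ c ∈ d.keys, d'.getD c [] = d.getD c [] := by
      intro c hc
      rw [hgd]
      have hnil : seg.filter (fun r => b_key r == c) = [] := by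
        apply List.filter_eq_nil_iff.2
        intro r hr
        have h1 := hkeyseg r hr
        have h2 := hlt c hc
        simp only [beq_iff_eq]
        omega
      rw [hnil, List.append_nil]
    refine ⟨hnd', ?_, ?_⟩
    · intro k hk
      rw [hkeys'] at hk
      rcases List.mem_append.1 hk with h | h
      · exact le_of_lt (hlt k h)
      · simp at h; omega
    · rw [PySem.Dict.values_eq_map_keys d' hnd' [], hkeys', List.map_append,
        PySem.Dict.values_eq_map_keys d hnd [], if_neg hseg]
      congr 1
      · exact List.map_congr_left (fun c hc => hgdne c hc)
      · simp [hgdb]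

-- the main loop correspondence, by induction on the number of remaining residues
lemma main_loop (length : Int) (diso_resids : List Int) :
    ∀ (n : Nat) (s : Int) (acc : List (List Int)) (d : PySem.Dict Int (List Int)),
      1 ≤ s → s % 5 = 1 → d.keys.Nodup → (∀ k ∈ d.keys, k < b_key s) →
      acc = d.values.filter (fun seg => decide (3 ≤ seg.length)) →
      (length + 1 - s).toNat ≤ n →
      (PySem.List.pyRange s (length + 1) 5).foldl (a_step length diso_resids) acc
        = ((PySem.List.pyRange s (length + 1) 1).foldl (b_step diso_resids) d).values.filter
            (fun seg => decide (3 ≤ seg.length)) := by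
  intro n
  induction n with
  | zero =>
    intro s acc d h1 h5 hnd hlt hacc hn
    have h : length + 1 ≤ s := by omega
    rw [pyRange5_eq_nil _ _ h, PySem.List.pyRange_one_eq_nil h]
    exact hacc
  | succ n ih =>
    intro s acc d h1 h5 hnd hlt hacc hn
    by_cases hs : length + 1 ≤ s
    · rw [pyRange5_eq_nil _ _ hs, PySem.List.pyRange_one_eq_nil hs]
      exact hacc
    · have h2 : s ≤ length := by omega
      set e := min (s + 5) (length + 1) with he
      obtain ⟨hnd', hle', hval'⟩ := blockB length diso_resids s d h5 h1 h2 hnd hlt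
      set seg := (PySem.List.pyRange s e 1).filter (fun r => decide (¬(r ∈ diso_resids))) with hsegdef
      set d' := (PySem.List.pyRange s e 1).foldl (b_step diso_resids) d with hd'def
      -- A's step over this block
      have haseg : a_segment length diso_resids s = seg := by
        unfold a_segment
        rw [PySem.List.foldl_append_ite_eq_filter (fun r => ¬(r ∈ diso_resids))]
        rw [List.nil_append, ← he]
      have hastep : a_step length diso_resids acc s
          = d'.values.filter (fun seg => decide (3 ≤ seg.length)) := by
        unfold a_step
        rw [haseg, hval', List.filter_append, hacc]
        by_cases hnil : seg = []
        · rw [if_pos hnil, if_neg (by rw [hnil]; simp)]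
          simp
        · rw [if_neg hnil]
          by_cases h3 : 3 ≤ seg.length
          · rw [if_pos h3]; simp [h3]
          · rw [if_neg h3]; simp [h3]
      rw [pyRange5_cons _ _ (by omega), List.foldl_cons,
        PySem.List.pyRange_one_append s e (length + 1) (by omega) (by omega),
        List.foldl_append, ← hd'def, hastep]
      by_cases h55 : s + 5 ≤ length + 1
      · have hmin : e = s + 5 := by omega
        rw [hmin]
        refine ih (s + 5) _ d' (by omega) (by omega) hnd' ?_ rfl (by omega)
        intro k hk
        rw [b_key_succ s h5]
        exact lt_of_le_of_lt (hle' k hk) (by omega)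
      · have hmin : e = length + 1 := by omega
        rw [hmin, pyRange5_eq_nil _ _ (by omega), PySem.List.pyRange_one_eq_nil (by omega)]
        simp

-- ===== VERDICT (by name: the statement is the Claim_ definition above) =====
theorem initial_segmentation_spec : Claim_equal_initial_segmentation := by
  intro length diso_resids _
  unfold Spec_initial_segmentation initial_segmentation initial_segmentation_alt
  exact main_loop length diso_resids length.toNat 1 [] PySem.Dict.empty (by norm_num)
    (by decide) (by decide) (by decide) (by decide) (by omega)
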